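-- pv_equiv track=rewrite | github.com/andreyputilovmaterial/Repair-CSV | repair_csv.py | is_signature_matching
-- ===== SOURCE A (Python) =====
-- from collections import deque
--
-- class CommonSignatureNotFound(Exception):
--     """Raised when common of 2 signatures is not found, and should be caught"""
--     pass
--
-- def is_signature_matching(sig1, sig2):
--
--     possible_transformations = {
--         '(sysmissing)': [],
--         '(empty)': ['(binary-always-1)','(binary-always-0)','(binary)','(number-integer)','(number-real)','(text-any)'],
--
--         '(binary-always-0)': ['(binary)'],
--         '(binary-always-1)': ['(binary)'],
--
--         '(binary)': ['(number-integer)'],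
--         '(number-integer)': ['(number-real)'],
--         '(number-real)': ['(text-any)'],
--     }
--     def reachable_with_distance(start):
--         distances = {start: 0}
--         queue = deque([start])
--
--         while queue:
--             node = queue.popleft()
--             for nxt in possible_transformations.get(node, []):
--                 if nxt not in distances:
--                     distances[nxt] = distances[node] + 1
--                     queue.append(nxt)
--
--         return distances
--
--
--     def closest_common(a, b):
--         da = reachable_with_distance(a)
--         db = {b:0}
--
--         common = set(da) & set(db)
--
--         if not common:
--             raise CommonSignatureNotFound('Common of {a} and {b} not found. Can\'t find derived signature that is common for both input signatiures'.format(a=a,b=b))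
--
--         return min(common, key=lambda x: da[x] + db[x])
--
--     result = tuple(closest_common(spec1,spec2) for spec1,spec2 in zip(sig1,sig2))
--     return not not result
-- ===== SOURCE B (Python) =====
-- # B: one precomputed reachability-closure table instead of a per-pair BFS.
-- class CommonSignatureNotFound(Exception):
--     """Raised when common of 2 signatures is not found, and should be caught"""
--     pass
--
-- # Transitive closure (including the node itself) of the fixed transformation graph.
-- _CLOSURE = {
--     '(sysmissing)': ['(sysmissing)'],
--     '(empty)': ['(empty)', '(binary-always-1)', '(binary-always-0)', '(binary)',
--                 '(number-integer)', '(number-real)', '(text-any)'],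
--     '(binary-always-0)': ['(binary-always-0)', '(binary)', '(number-integer)',
--                           '(number-real)', '(text-any)'],
--     '(binary-always-1)': ['(binary-always-1)', '(binary)', '(number-integer)',
--                           '(number-real)', '(text-any)'],
--     '(binary)': ['(binary)', '(number-integer)', '(number-real)', '(text-any)'],
--     '(number-integer)': ['(number-integer)', '(number-real)', '(text-any)'],
--     '(number-real)': ['(number-real)', '(text-any)'],
-- }
--
-- def is_signature_matching(sig1, sig2):
--     seen = False
--     for spec1, spec2 in zip(sig1, sig2):
--         if spec2 not in _CLOSURE.get(spec1, [spec1]):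
--             raise CommonSignatureNotFound('Common of {a} and {b} not found. Can\'t find derived signature that is common for both input signatiures'.format(a=spec1, b=spec2))
--         seen = True
--     return seen
-- ===== Notes on version B (the rewrite author's own statement) =====
-- stated objective: faster
-- what changed: Replaced the per-pair BFS with distance bookkeeping (deque + distance dict rebuilt for every pair) by a single precomputed reachability-closure table consulted with one membership test per pair, accumulating the seen-flag in one loop.
-- outside the precondition, e.g. on is_signature_matching(['(binary)'], ['(empty)']): A raises CommonSignatureNotFound, B raises CommonSignatureNotFound
import Mathlib
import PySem

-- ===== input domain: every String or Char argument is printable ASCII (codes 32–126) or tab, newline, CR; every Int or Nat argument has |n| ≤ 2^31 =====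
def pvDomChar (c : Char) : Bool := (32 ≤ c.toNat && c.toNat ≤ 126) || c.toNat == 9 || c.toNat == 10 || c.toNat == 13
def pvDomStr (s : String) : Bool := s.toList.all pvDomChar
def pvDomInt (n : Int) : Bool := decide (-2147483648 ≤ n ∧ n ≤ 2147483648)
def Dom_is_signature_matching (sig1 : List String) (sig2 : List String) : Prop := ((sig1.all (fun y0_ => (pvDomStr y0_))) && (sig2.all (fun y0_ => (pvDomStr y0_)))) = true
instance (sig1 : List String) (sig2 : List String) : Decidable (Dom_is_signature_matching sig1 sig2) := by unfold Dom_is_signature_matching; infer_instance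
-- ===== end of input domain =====

-- B replaces A's per-pair BFS by a single precomputed reachability-closure table (simpler);
-- the equivalence is about RETURN values on Pre_ (outside Pre_ both Pythons raise CommonSignatureNotFound).

-- ===== PORT A =====
def pvGraph : PySem.Dict String (List String) :=
  PySem.Dict.ofList [
    ("(sysmissing)", []),
    ("(empty)", ["(binary-always-1)", "(binary-always-0)", "(binary)", "(number-integer)", "(number-real)", "(text-any)"]),
    ("(binary-always-0)", ["(binary)"]),
    ("(binary-always-1)", ["(binary)"]),
    ("(binary)", ["(number-integer)"]),
    ("(number-integer)", ["(number-real)"]),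
    ("(number-real)", ["(text-any)"])]

-- the BFS while-loop of reachable_with_distance; fuel 16 exceeds any possible number of
-- dequeues on the fixed 8-node graph, so it is never exhausted
def pvBfs (fuel : Nat) (distances : PySem.Dict String Int) (queue : List String) : PySem.Dict String Int :=
  match fuel, queue with
  | 0, _ => distances
  | _ + 1, [] => distances
  | f + 1, node :: rest =>
      let st := (pvGraph.getD node []).foldl
        (fun (st : PySem.Dict String Int × List String) nxt =>
          if (st.1.get? nxt).isNone then
            (st.1.insert nxt (st.1.getD node 0 + 1), st.2 ++ [nxt])
          else st) (distances, rest)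
      pvBfs f st.1 st.2

def reachable_with_distance (start : String) : PySem.Dict String Int :=
  pvBfs 16 (PySem.Dict.ofList [(start, 0)]) [start]

-- returns none exactly where Python raises CommonSignatureNotFound
def closest_common (a b : String) : Option String :=
  let da := reachable_with_distance a
  let db : PySem.Dict String Int := PySem.Dict.ofList [(b, 0)]
  let common := PySem.Set.inter (PySem.Set.ofList da.keys) db.keys
  if common.isEmpty then none
  else PySem.List.min? common (fun x => da.getD x 0 + db.getD x 0)

def is_signature_matching (sig1 : List String) (sig2 : List String) : Bool :=
  match (sig1.zip sig2).mapM (fun p => closest_common p.1 p.2) with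
  | none => false            -- the CommonSignatureNotFound path, excluded by Pre_
  | some result => !result.isEmpty

-- ===== PORT B =====
def pvClosure : PySem.Dict String (List String) :=
  PySem.Dict.ofList [
    ("(sysmissing)", ["(sysmissing)"]),
    ("(empty)", ["(empty)", "(binary-always-1)", "(binary-always-0)", "(binary)", "(number-integer)", "(number-real)", "(text-any)"]),
    ("(binary-always-0)", ["(binary-always-0)", "(binary)", "(number-integer)", "(number-real)", "(text-any)"]),
    ("(binary-always-1)", ["(binary-always-1)", "(binary)", "(number-integer)", "(number-real)", "(text-any)"]),
    ("(binary)", ["(binary)", "(number-integer)", "(number-real)", "(text-any)"]),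
    ("(number-integer)", ["(number-integer)", "(number-real)", "(text-any)"]),
    ("(number-real)", ["(number-real)", "(text-any)"])]

-- B's for-loop over the zipped pairs; none exactly where Python B raises CommonSignatureNotFound
def pvAltLoop (pairs : List (String × String)) (seen : Bool) : Option Bool :=
  match pairs with
  | [] => some seen
  | (a, b) :: rest =>
      if (pvClosure.getD a [a]).contains b then pvAltLoop rest true else none

def is_signature_matching_alt (sig1 : List String) (sig2 : List String) : Bool :=
  (pvAltLoop (sig1.zip sig2) false).getD false   -- the raise path, excluded by Pre_

-- ===== PRECONDITION & SPEC =====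
-- stand-alone closed-form table: the strict part of the reachability closure of A's fixed graph
def pvReachPairs : List (String × String) :=
  [("(empty)", "(binary-always-1)"), ("(empty)", "(binary-always-0)"), ("(empty)", "(binary)"),
   ("(empty)", "(number-integer)"), ("(empty)", "(number-real)"), ("(empty)", "(text-any)"),
   ("(binary-always-0)", "(binary)"), ("(binary-always-0)", "(number-integer)"),
   ("(binary-always-0)", "(number-real)"), ("(binary-always-0)", "(text-any)"),
   ("(binary-always-1)", "(binary)"), ("(binary-always-1)", "(number-integer)"),
   ("(binary-always-1)", "(number-real)"), ("(binary-always-1)", "(text-any)"),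
   ("(binary)", "(number-integer)"), ("(binary)", "(number-real)"), ("(binary)", "(text-any)"),
   ("(number-integer)", "(number-real)"), ("(number-integer)", "(text-any)"),
   ("(number-real)", "(text-any)")]

-- Pre_ excludes exactly the inputs on which Python A raises CommonSignatureNotFound:
-- some zipped pair (a, b) with b neither equal to a nor a transformation reachable from a
def Pre_is_signature_matching (sig1 : List String) (sig2 : List String) : Prop :=
  ∀ p ∈ sig1.zip sig2, p.2 = p.1 ∨ p ∈ pvReachPairs
instance (sig1 : List String) (sig2 : List String) : Decidable (Pre_is_signature_matching sig1 sig2) := by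
  unfold Pre_is_signature_matching; infer_instance

def pvWitness_is_signature_matching : List String × List String :=
  (["(empty)", "(binary)"], ["(number-real)", "(binary)"])

def Spec_is_signature_matching (sig1 : List String) (sig2 : List String) (out : Bool) : Prop := out = is_signature_matching_alt sig1 sig2
instance (sig1 : List String) (sig2 : List String) (out : Bool) : Decidable (Spec_is_signature_matching sig1 sig2 out) := by unfold Spec_is_signature_matching; infer_instance

-- ===== CLAIM (what is proved, stated in full; the proofs are below) =====
def Claim_equal_is_signature_matching : Prop := ∀ (sig1 : List String) (sig2 : List String), Dom_is_signature_matching sig1 sig2 → Pre_is_signature_matching sig1 sig2 → Spec_is_signature_matching sig1 sig2 (is_signature_matching sig1 sig2)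

-- ===== LEMMAS AND PROOFS =====

-- the insert-chain spellings of the two literal dicts (definitionally equal to the ofList forms)
def pvGraphChain : PySem.Dict String (List String) :=
  (((((((PySem.Dict.empty.insert "(sysmissing)" []).insert "(empty)" ["(binary-always-1)", "(binary-always-0)", "(binary)", "(number-integer)", "(number-real)", "(text-any)"]).insert "(binary-always-0)" ["(binary)"]).insert "(binary-always-1)" ["(binary)"]).insert "(binary)" ["(number-integer)"]).insert "(number-integer)" ["(number-real)"]).insert "(number-real)" ["(text-any)"])

def pvClosureChain : PySem.Dict String (List String) :=
  (((((((PySem.Dict.empty.insert "(sysmissing)" ["(sysmissing)"]).insert "(empty)" ["(empty)", "(binary-always-1)", "(binary-always-0)", "(binary)", "(number-integer)", "(number-real)", "(text-any)"]).insert "(binary-always-0)" ["(binary-always-0)", "(binary)", "(number-integer)", "(number-real)", "(text-any)"]).insert "(binary-always-1)" ["(binary-always-1)", "(binary)", "(number-integer)", "(number-real)", "(text-any)"]).insert "(binary)" ["(binary)", "(number-integer)", "(number-real)", "(text-any)"]).insert "(number-integer)" ["(number-integer)", "(number-real)", "(text-any)"]).insert "(number-real)" ["(number-real)", "(text-any)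"])

-- set(da) & set(db) with a one-key db is nonempty exactly when b is a key of da
lemma pv_inter_single (L : List String) (b : String) :
    (PySem.Set.inter (PySem.Set.ofList L) [b]).isEmpty = !(L.contains b) := by
  simp only [PySem.Set.inter, PySem.Set.contains_eq_listContains, List.contains_eq_mem,
    List.mem_cons, List.not_mem_nil, or_false]
  rw [Bool.eq_iff_iff]
  simp [List.isEmpty_iff, List.filter_eq_nil_iff, PySem.Set.mem_ofList]
  exact ⟨fun h hb => h b hb rfl, fun h a ha e => h (e ▸ ha)⟩

-- A's closest_common finds a common signature iff b is a key of the BFS dict of a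
lemma closest_isSome (a b : String) :
    (closest_common a b).isSome = ((reachable_with_distance a).keys).contains b := by
  simp only [closest_common]
  rw [show (PySem.Dict.ofList [(b, (0:Int))]).keys = [b] from rfl]
  have h := pv_inter_single ((reachable_with_distance a).keys) b
  cases hc : ((reachable_with_distance a).keys).contains b with
  | false =>
    rw [hc] at h; simp only [Bool.not_false] at h
    simp [h]
  | true =>
    rw [hc] at h; simp only [Bool.not_true] at h
    rw [if_neg (by simp [h])]
    rw [Option.isSome_iff_ne_none]
    simp [PySem.List.min?_eq_none_iff, ← List.isEmpty_iff, h]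

-- the per-pair agreement: A's BFS succeeds exactly when B's closure table admits the pair
lemma pair_ok (a b : String) :
    (closest_common a b).isSome = (pvClosure.getD a [a]).contains b := by
  by_cases h0 : a = "(sysmissing)"
  · subst h0
    rw [closest_isSome, show (reachable_with_distance "(sysmissing)").keys = ["(sysmissing)"] from rfl,
        show pvClosure.getD "(sysmissing)" ["(sysmissing)"] = ["(sysmissing)"] from rfl]
  by_cases h1 : a = "(empty)"
  · subst h1
    rw [closest_isSome, show (reachable_with_distance "(empty)").keys = ["(empty)", "(binary-always-1)", "(binary-always-0)", "(binary)", "(number-integer)", "(number-real)", "(text-any)"] from rfl,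
        show pvClosure.getD "(empty)" ["(empty)"] = ["(empty)", "(binary-always-1)", "(binary-always-0)", "(binary)", "(number-integer)", "(number-real)", "(text-any)"] from rfl]
  by_cases h2 : a = "(binary-always-0)"
  · subst h2
    rw [closest_isSome, show (reachable_with_distance "(binary-always-0)").keys = ["(binary-always-0)", "(binary)", "(number-integer)", "(number-real)", "(text-any)"] from rfl,
        show pvClosure.getD "(binary-always-0)" ["(binary-always-0)"] = ["(binary-always-0)", "(binary)", "(number-integer)", "(number-real)", "(text-any)"] from rfl]
  by_cases h3 : a = "(binary-always-1)"
  · subst h3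
    rw [closest_isSome, show (reachable_with_distance "(binary-always-1)").keys = ["(binary-always-1)", "(binary)", "(number-integer)", "(number-real)", "(text-any)"] from rfl,
        show pvClosure.getD "(binary-always-1)" ["(binary-always-1)"] = ["(binary-always-1)", "(binary)", "(number-integer)", "(number-real)", "(text-any)"] from rfl]
  by_cases h4 : a = "(binary)"
  · subst h4
    rw [closest_isSome, show (reachable_with_distance "(binary)").keys = ["(binary)", "(number-integer)", "(number-real)", "(text-any)"] from rfl,
        show pvClosure.getD "(binary)" ["(binary)"] = ["(binary)", "(number-integer)", "(number-real)", "(text-any)"] from rfl]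
  by_cases h5 : a = "(number-integer)"
  · subst h5
    rw [closest_isSome, show (reachable_with_distance "(number-integer)").keys = ["(number-integer)", "(number-real)", "(text-any)"] from rfl,
        show pvClosure.getD "(number-integer)" ["(number-integer)"] = ["(number-integer)", "(number-real)", "(text-any)"] from rfl]
  by_cases h6 : a = "(number-real)"
  · subst h6
    rw [closest_isSome, show (reachable_with_distance "(number-real)").keys = ["(number-real)", "(text-any)"] from rfl,
        show pvClosure.getD "(number-real)" ["(number-real)"] = ["(number-real)", "(text-any)"] from rfl]
  · have hG : pvGraph.getD a [] = [] := by
      rw [show pvGraph = pvGraphChain from rfl, pvGraphChain, PySem.Dict.getD_insert_of_ne _ _ _ h6, PySem.Dict.getD_insert_of_ne _ _ _ h5, PySem.Dict.getD_insert_of_ne _ _ _ h4, PySem.Dict.getD_insert_of_ne _ _ _ h3, PySem.Dict.getD_insert_of_ne _ _ _ h2, PySem.Dict.getD_insert_of_ne _ _ _ h1, PySem.Dict.getD_insert_of_ne _ _ _ h0, PySem.Dict.getD_empty]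
    have hC : pvClosure.getD a [a] = [a] := by
      rw [show pvClosure = pvClosureChain from rfl, pvClosureChain, PySem.Dict.getD_insert_of_ne _ _ _ h6, PySem.Dict.getD_insert_of_ne _ _ _ h5, PySem.Dict.getD_insert_of_ne _ _ _ h4, PySem.Dict.getD_insert_of_ne _ _ _ h3, PySem.Dict.getD_insert_of_ne _ _ _ h2, PySem.Dict.getD_insert_of_ne _ _ _ h1, PySem.Dict.getD_insert_of_ne _ _ _ h0, PySem.Dict.getD_empty]
    have hR : (reachable_with_distance a).keys = [a] := by
      unfold reachable_with_distance
      rw [pvBfs]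
      simp only [hG, List.foldl_nil]
      rfl
    rw [closest_isSome, hR, hC]

-- the two loops agree: B's loop is A's mapM with the seen-flag folded in
lemma altLoop_eq_mapM (pairs : List (String × String)) (s : Bool) :
    pvAltLoop pairs s =
      ((pairs.mapM (fun p => closest_common p.1 p.2)).map (fun r => s || !r.isEmpty)) := by
  induction pairs generalizing s with
  | nil => simp [pvAltLoop]
  | cons p rest ih =>
    obtain ⟨a, b⟩ := p
    rw [pvAltLoop, ← pair_ok a b]
    cases h : closest_common a b with
    | none => simp [List.mapM_cons, h]
    | some x =>
      simp only [Option.isSome_some, ih, List.mapM_cons, h]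
      cases hr : rest.mapM (fun p => closest_common p.1 p.2) <;> simp

-- ===== VERDICT (by name: the statement is the Claim_ definition above) =====
theorem is_signature_matching_spec : Claim_equal_is_signature_matching := by
  intro sig1 sig2 _ _
  unfold Spec_is_signature_matching is_signature_matching is_signature_matching_alt
  rw [altLoop_eq_mapM]
  cases h : (sig1.zip sig2).mapM (fun p => closest_common p.1 p.2) <;> simp
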